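-- pv_equiv track=rewrite | github.com/meekotharaccoon-cell/meeko-nerve-center | mycelium/fork_onboarding.py | get_personalized_tip
-- ===== SOURCE A (Python) =====
-- def get_personalized_tip(profile):
--     bio  = (profile.get('bio') or '').lower()
--     tips = []
--     if any(k in bio for k in ['journalist', 'reporter', 'press', 'media', 'writer']):
--         tips.append('Your bio suggests journalism \u2014 add MASTODON_TOKEN first. Your system will auto-manage press relationships.')
--     elif any(k in bio for k in ['developer', 'engineer', 'code', 'python', 'software']):
--         tips.append('For developers: check mycelium/self_evolution.py \u2014 it\'s what writes new engines. The code is clean.')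
--     elif any(k in bio for k in ['activist', 'organizer', 'community', 'palestine', 'rights']):
--         tips.append('For organizers: the accountability engine flags congressional trades related to any cause you add. Open world_intelligence.py and add your keywords.')
--     elif any(k in bio for k in ['artist', 'design', 'creative']):
--         tips.append('Artists: the art_cause_generator.py creates images from accountability data. Check public/images/ after first run.')
--     else:
--         tips.append('Tip: the system emails you a daily intelligence report. Check your inbox after the first Actions run.')
--     return tips[0] if tips else ''
-- ===== SOURCE B (Python) =====
-- _KEYWORD_CATEGORY = {
--     'journalist': 0, 'reporter': 0, 'press': 0, 'media': 0, 'writer': 0,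
--     'developer': 1, 'engineer': 1, 'code': 1, 'python': 1, 'software': 1,
--     'activist': 2, 'organizer': 2, 'community': 2, 'palestine': 2, 'rights': 2,
--     'artist': 3, 'design': 3, 'creative': 3,
-- }
--
-- _TIPS = [
--     'Your bio suggests journalism \u2014 add MASTODON_TOKEN first. Your system will auto-manage press relationships.',
--     'For developers: check mycelium/self_evolution.py \u2014 it\'s what writes new engines. The code is clean.',
--     'For organizers: the accountability engine flags congressional trades related to any cause you add. Open world_intelligence.py and add your keywords.',
--     'Artists: the art_cause_generator.py creates images from accountability data. Check public/images/ after first run.',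
--     'Tip: the system emails you a daily intelligence report. Check your inbox after the first Actions run.',
-- ]
--
--
-- def get_personalized_tip(profile):
--     bio = (profile.get('bio') or '').lower()
--     cat = min((c for k, c in _KEYWORD_CATEGORY.items() if k in bio), default=len(_TIPS) - 1)
--     return _TIPS[cat]
-- ===== Notes on version B (the rewrite author's own statement) =====
-- stated objective: alternative
-- what changed: B inverts the control flow: priority is encoded as a category number per keyword in one flat keyword-to-category map; it takes the minimum category index among keywords found in the bio (default 4) and indexes a tip array, so the ordered if/elif group tests and the early exit disappear.
import Mathlib
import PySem

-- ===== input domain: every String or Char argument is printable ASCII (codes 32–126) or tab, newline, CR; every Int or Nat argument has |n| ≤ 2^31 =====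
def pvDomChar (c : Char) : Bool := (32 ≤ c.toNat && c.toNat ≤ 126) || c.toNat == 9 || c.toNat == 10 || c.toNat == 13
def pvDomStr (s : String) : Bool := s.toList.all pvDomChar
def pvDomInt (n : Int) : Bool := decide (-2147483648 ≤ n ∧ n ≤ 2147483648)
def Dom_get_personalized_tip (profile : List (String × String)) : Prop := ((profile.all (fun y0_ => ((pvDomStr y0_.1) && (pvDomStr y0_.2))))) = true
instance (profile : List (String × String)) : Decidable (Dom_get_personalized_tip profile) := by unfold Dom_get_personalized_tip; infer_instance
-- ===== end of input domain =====

-- B encodes the if/elif priority numerically: one flat keyword→category map, the minimum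
-- matching category index (default 4) selects the tip from an array; objective: alternative.
-- ===== PORT A =====
def get_personalized_tip (profile : List (String × String)) : String :=
  let bio := PySem.Str.lower ((PySem.Dict.mk profile).getD "bio" "")
  let tips : List String := []
  let tips :=
    if (["journalist", "reporter", "press", "media", "writer"].any
        (fun k => PySem.Str.isIn k bio)) then
      tips ++ ["Your bio suggests journalism — add MASTODON_TOKEN first. Your system will auto-manage press relationships."]
    else if (["developer", "engineer", "code", "python", "software"].any
        (fun k => PySem.Str.isIn k bio)) then
      tips ++ ["For developers: check mycelium/self_evolution.py — it's what writes new engines. The code is clean."]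
    else if (["activist", "organizer", "community", "palestine", "rights"].any
        (fun k => PySem.Str.isIn k bio)) then
      tips ++ ["For organizers: the accountability engine flags congressional trades related to any cause you add. Open world_intelligence.py and add your keywords."]
    else if (["artist", "design", "creative"].any
        (fun k => PySem.Str.isIn k bio)) then
      tips ++ ["Artists: the art_cause_generator.py creates images from accountability data. Check public/images/ after first run."]
    else
      tips ++ ["Tip: the system emails you a daily intelligence report. Check your inbox after the first Actions run."]
  match tips with
  | [] => ""
  | t :: _ => t

-- ===== PORT B =====
def pvKeywordCategory : List (String × Nat) :=
  [ ("journalist", 0), ("reporter", 0), ("press", 0), ("media", 0), ("writer", 0),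
    ("developer", 1), ("engineer", 1), ("code", 1), ("python", 1), ("software", 1),
    ("activist", 2), ("organizer", 2), ("community", 2), ("palestine", 2), ("rights", 2),
    ("artist", 3), ("design", 3), ("creative", 3) ]

def pvTips : List String :=
  [ "Your bio suggests journalism — add MASTODON_TOKEN first. Your system will auto-manage press relationships.",
    "For developers: check mycelium/self_evolution.py — it's what writes new engines. The code is clean.",
    "For organizers: the accountability engine flags congressional trades related to any cause you add. Open world_intelligence.py and add your keywords.",
    "Artists: the art_cause_generator.py creates images from accountability data. Check public/images/ after first run.",
    "Tip: the system emails you a daily intelligence report. Check your inbox after the first Actions run." ]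

-- min over the matching categories, default = len(_TIPS) - 1, as a fold over the map
def pvMinCat (bio : String) (l : List (String × Nat)) (acc : Nat) : Nat :=
  l.foldl (fun a p => if PySem.Str.isIn p.1 bio then min a p.2 else a) acc

def get_personalized_tip_alt (profile : List (String × String)) : String :=
  let bio := PySem.Str.lower ((PySem.Dict.mk profile).getD "bio" "")
  let cat := pvMinCat bio pvKeywordCategory (pvTips.length - 1)
  pvTips.getD cat ""

-- ===== PRECONDITION & SPEC =====
def Spec_get_personalized_tip (profile : List (String × String)) (out : String) : Prop := out = get_personalized_tip_alt profile
instance (profile : List (String × String)) (out : String) : Decidable (Spec_get_personalized_tip profile out) := by unfold Spec_get_personalized_tip; infer_instance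

-- ===== CLAIM (what is proved, stated in full; the proofs are below) =====
def Claim_equal_get_personalized_tip : Prop := ∀ (profile : List (String × String)), Dom_get_personalized_tip profile → Spec_get_personalized_tip profile (get_personalized_tip profile)

-- ===== LEMMAS AND PROOFS =====

-- the fold over one category's keywords (all with the same category index c)
theorem pvMinCat_group (bio : String) (g : List String) (c : Nat) (acc : Nat) :
    pvMinCat bio (g.map (fun k => (k, c))) acc
      = if g.any (fun k => PySem.Str.isIn k bio) then min acc c else acc := by
  induction g generalizing acc with
  | nil => simp [pvMinCat]
  | cons k g ih =>
    rw [List.map_cons]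
    rw [show pvMinCat bio ((k, c) :: g.map (fun k => (k, c))) acc
        = pvMinCat bio (g.map (fun k => (k, c)))
            (if PySem.Str.isIn k bio then min acc c else acc) from rfl]
    rw [ih, List.any_cons]
    cases hkb : PySem.Str.isIn k bio <;>
      cases hgb : g.any (fun k => PySem.Str.isIn k bio) <;>
        simp [hkb, hgb, min_assoc, min_self]

theorem pvMinCat_append (bio : String) (l₁ l₂ : List (String × Nat)) (acc : Nat) :
    pvMinCat bio (l₁ ++ l₂) acc = pvMinCat bio l₂ (pvMinCat bio l₁ acc) := by
  simp [pvMinCat, List.foldl_append]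

-- the flat map is the four category groups in order
theorem pvKeywordCategory_eq :
    pvKeywordCategory
      = (["journalist", "reporter", "press", "media", "writer"].map (fun k => (k, 0)))
        ++ (["developer", "engineer", "code", "python", "software"].map (fun k => (k, 1)))
        ++ (["activist", "organizer", "community", "palestine", "rights"].map (fun k => (k, 2)))
        ++ (["artist", "design", "creative"].map (fun k => (k, 3))) := rfl

-- ===== VERDICT (by name: the statement is the Claim_ definition above) =====
theorem get_personalized_tip_spec : Claim_equal_get_personalized_tip := by
  intro profile _
  unfold Spec_get_personalized_tip get_personalized_tip get_personalized_tip_alt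
  dsimp only
  rw [pvKeywordCategory_eq, pvMinCat_append, pvMinCat_append, pvMinCat_append,
      pvMinCat_group, pvMinCat_group, pvMinCat_group, pvMinCat_group]
  split_ifs <;> rfl
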